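-- pv_equiv track=rewrite | github.com/vkolte9/pions-invoice-app | app.py | wrap_address_top_down_balanced
-- ===== SOURCE A (Python) =====
-- def wrap_address_top_down_balanced(text, rows=4):
--     parts = [part.strip() for part in text.split(',') if part.strip()]
--     total = len(parts)
--     if total == 0:
--         return [""] * rows
--
--     lines, i = [], 0
--     for r in range(rows):
--         remaining = total - i
--         size = max(1, remaining // (rows - r)) if (rows - r) > 0 else 1
--         line = ", ".join(parts[i:i + size])
--         lines.append(line)
--         i += size
--         if i >= total:
--             break
--     while len(lines) < rows:
--         lines.append("")
--     return lines[:rows]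
-- ===== SOURCE B (Python) =====
-- def wrap_address_top_down_balanced(text, rows=4):
--     parts = [part.strip() for part in text.split(',') if part.strip()]
--     total = len(parts)
--     if total == 0:
--         return [""] * rows
--     if rows <= 0:
--         return []
--     if total >= rows:
--         base, rem = divmod(total, rows)
--         sizes = [base] * (rows - rem) + [base + 1] * rem
--     else:
--         sizes = [1] * total + [0] * (rows - total)
--     out, i = [], 0
--     for s in sizes:
--         out.append(", ".join(parts[i:i + s]))
--         i += s
--     return out
-- ===== Notes on version B (the rewrite author's own statement) =====
-- stated objective: alternative
-- what changed: Replaces A's per-row greedy loop (size = max(1, remaining // rows_left), early break, then pad-and-truncate) with row sizes computed once in closed form from divmod(total, rows) (front-loading singletons when total < rows), followed by a single cumulative slicing pass.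
import Mathlib
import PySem

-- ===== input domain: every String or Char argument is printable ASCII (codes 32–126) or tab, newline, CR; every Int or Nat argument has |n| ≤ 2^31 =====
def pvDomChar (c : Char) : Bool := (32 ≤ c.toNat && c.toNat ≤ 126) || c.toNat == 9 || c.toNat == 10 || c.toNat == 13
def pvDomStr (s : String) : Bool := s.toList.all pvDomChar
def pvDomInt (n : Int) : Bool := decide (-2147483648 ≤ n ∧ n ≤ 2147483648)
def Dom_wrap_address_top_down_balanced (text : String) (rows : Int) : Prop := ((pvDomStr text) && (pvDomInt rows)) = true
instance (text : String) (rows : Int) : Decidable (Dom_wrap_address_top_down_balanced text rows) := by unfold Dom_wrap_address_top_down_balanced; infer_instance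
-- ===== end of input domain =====

-- B replaces A's per-row greedy loop (remaining // rows_left with break and pad) by closed-form
-- row sizes computed once from divmod, then a single slicing pass (objective: alternative).

-- ===== PORT A =====
-- the for-loop with break, as structural recursion over the range list; state = (lines, i)
def pvALoop (parts : List String) (total rows : Int) : List Int → List String → Int → List String
  | [], lines, _ => lines
  | r :: rs, lines, i =>
    let remaining := total - i
    let size := if rows - r > 0 then max 1 (PySem.Int.floordiv remaining (rows - r)) else 1
    let line := PySem.Str.join ", " (PySem.List.slice parts (some i) (some (i + size)))
    let lines' := lines ++ [line]
    let i' := i + size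
    if i' ≥ total then lines' else pvALoop parts total rows rs lines' i'

-- the 'while len(lines) < rows: lines.append("")' loop
def pvPad (rows : Int) (lines : List String) : List String :=
  if (lines.length : Int) < rows then pvPad rows (lines ++ [""]) else lines
termination_by (rows - lines.length).toNat
decreasing_by simp; omega

def wrap_address_top_down_balanced (text : String) (rows : Int) : List String :=
  let parts := (((PySem.Str.split? text ",").getD []).filter
      (fun part => PySem.Str.strip part ≠ "")).map PySem.Str.strip
  let total : Int := parts.length
  if total = 0 then PySem.List.pyRepeat [""] rows
  else
    let lines := pvALoop parts total rows (PySem.List.pyRange 0 rows 1) [] 0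
    PySem.List.slice (pvPad rows lines) none (some rows)

-- ===== PORT B =====
def wrap_address_top_down_balanced_alt (text : String) (rows : Int) : List String :=
  let parts := (((PySem.Str.split? text ",").getD []).filter
      (fun part => PySem.Str.strip part ≠ "")).map PySem.Str.strip
  let total : Int := parts.length
  if total = 0 then PySem.List.pyRepeat [""] rows
  else if rows ≤ 0 then []
  else
    let sizes : List Int :=
      if total ≥ rows then
        let base := PySem.Int.floordiv total rows
        let rem := PySem.Int.mod total rows
        PySem.List.pyRepeat [base] (rows - rem) ++ PySem.List.pyRepeat [base + 1] rem
      else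
        PySem.List.pyRepeat [(1 : Int)] total ++ PySem.List.pyRepeat [(0 : Int)] (rows - total)
    (sizes.foldl
      (fun (acc : List String × Int) s =>
        (acc.1 ++ [PySem.Str.join ", " (PySem.List.slice parts (some acc.2) (some (acc.2 + s)))],
         acc.2 + s))
      ([], 0)).1

-- ===== PRECONDITION & SPEC =====
def Spec_wrap_address_top_down_balanced (text : String) (rows : Int) (out : List String) : Prop := out = wrap_address_top_down_balanced_alt text rows
instance (text : String) (rows : Int) (out : List String) : Decidable (Spec_wrap_address_top_down_balanced text rows out) := by unfold Spec_wrap_address_top_down_balanced; infer_instance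

-- ===== CLAIM (what is proved, stated in full; the proofs are below) =====
def Claim_equal_wrap_address_top_down_balanced : Prop := ∀ (text : String) (rows : Int), Dom_wrap_address_top_down_balanced text rows → Spec_wrap_address_top_down_balanced text rows (wrap_address_top_down_balanced text rows)

-- ===== LEMMAS AND PROOFS =====

-- Nat-level model of A's greedy size sequence (loop with break)
def pvSizesA (m k : Nat) : List Nat :=
  if m ≤ max 1 (m / k) then [max 1 (m / k)]
  else max 1 (m / k) :: pvSizesA (m - max 1 (m / k)) (k - 1)
termination_by m
decreasing_by omega

-- Nat-level model of B's closed-form sizes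
def pvSizesB (m k : Nat) : List Nat :=
  if k ≤ m then List.replicate (k - m % k) (m / k) ++ List.replicate (m % k) (m / k + 1)
  else List.replicate m 1 ++ List.replicate (k - m) 0

def pvRender (parts : List String) : Nat → List Nat → List String
  | _, [] => []
  | i, s :: ss => PySem.Str.join ", " ((parts.drop i).take s) :: pvRender parts (i + s) ss

theorem pvRender_length (parts : List String) : ∀ i ss, (pvRender parts i ss).length = ss.length := by
  intro i ss
  induction ss generalizing i with
  | nil => simp [pvRender]
  | cons s ss ih => simp [pvRender, ih]

theorem pvRender_append (parts : List String) :
    ∀ xs ys i, pvRender parts i (xs ++ ys) = pvRender parts i xs ++ pvRender parts (i + xs.sum) ys := by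
  intro xs
  induction xs with
  | nil => simp [pvRender]
  | cons x xs ih => intro ys i; simp [pvRender, ih, Nat.add_assoc]

theorem pvRender_replicate_zero (parts : List String) :
    ∀ t i, pvRender parts i (List.replicate t 0) = List.replicate t "" := by
  intro t
  induction t with
  | zero => intro i; simp [pvRender]
  | succ t ih =>
    intro i
    have hj : PySem.Str.join ", " ([] : List String) = "" := rfl
    simp [List.replicate_succ, pvRender, hj, ih]

theorem pvSizesB_length (m k : Nat) (_hm : 1 ≤ m) (hk : 1 ≤ k) : (pvSizesB m k).length = k := by
  unfold pvSizesB
  split_ifs with h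
  · have h2 : m % k < k := Nat.mod_lt _ (by omega)
    rw [List.length_append, List.length_replicate, List.length_replicate]
    omega
  · rw [List.length_append, List.length_replicate, List.length_replicate]
    omega

-- the heart: A's greedy sizes, padded with zeros to k rows, are exactly B's closed-form sizes
theorem pvSizes_key : ∀ m k, 1 ≤ m → 1 ≤ k →
    pvSizesA m k ++ List.replicate (k - (pvSizesA m k).length) 0 = pvSizesB m k := by
  intro m
  induction m using Nat.strong_induction_on with
  | _ m ih =>
    intro k hm hk
    rw [pvSizesA]
    by_cases hble : m ≤ max 1 (m / k)
    · rw [if_pos hble]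
      by_cases hkm : k ≤ m
      · -- m / k ≥ 1 and m ≤ max 1 (m/k) forces m / k = m hence k = 1
        have h1 : 1 ≤ m / k := Nat.one_le_div_iff (by omega) |>.mpr hkm
        have hdle : m / k ≤ m := Nat.div_le_self _ _
        have hdm : m / k = m := by omega
        have hk1 : k = 1 := by
          by_contra hne
          have : m / k < m := Nat.div_lt_self (by omega) (by omega)
          omega
        subst hk1
        rw [Nat.div_one] at hdm ⊢
        have hmax : max 1 m = m := by omega
        rw [hmax]
        simp [pvSizesB, Nat.mod_one, Nat.div_one]
        intro hzero
        omega
      · -- m < k, so m / k = 0, size 1, m = 1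
        have hdz : m / k = 0 := Nat.div_eq_of_lt (by omega)
        have hm1 : m = 1 := by omega
        subst hm1
        simp [pvSizesB, hdz, hkm]
    · rw [if_neg hble]
      have hs1 : 1 ≤ max 1 (m / k) := le_max_left _ _
      have hk2 : 2 ≤ k := by
        by_contra hne
        have hk1 : k = 1 := by omega
        rw [hk1, Nat.div_one] at hble
        omega
      have hrec := ih (m - max 1 (m / k)) (by omega) (k - 1) (by omega) (by omega)
      have hlen : (pvSizesA (m - max 1 (m / k)) (k - 1)).length ≤ k - 1 := by
        have hlb := pvSizesB_length (m - max 1 (m / k)) (k - 1)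
          (show 1 ≤ m - max 1 (m / k) by omega) (by omega)
        have := congrArg List.length hrec
        rw [List.length_append, List.length_replicate, hlb] at this
        omega
      have hlen' : k - (max 1 (m / k) :: pvSizesA (m - max 1 (m / k)) (k - 1)).length
          = (k - 1) - (pvSizesA (m - max 1 (m / k)) (k - 1)).length := by
        rw [List.length_cons]; omega
      rw [List.cons_append, hlen', hrec]
      -- now show max 1 (m/k) :: pvSizesB (m - max 1 (m/k)) (k - 1) = pvSizesB m k
      by_cases hkm : k ≤ m
      · have h1 : 1 ≤ m / k := Nat.one_le_div_iff (by omega) |>.mpr hkm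
        have hsd : max 1 (m / k) = m / k := by omega
        rw [hsd]
        have hmod0 : k * (m / k) + m % k = m := Nat.div_add_mod m k
        set q := m / k with hq
        set r := m % k with hr
        have hmod : m = k * q + r := by omega
        have hrk : r < k := Nat.mod_lt _ (by omega)
        have hqk : (k - 1) * q = k * q - q := by rw [Nat.sub_mul, one_mul]
        have hqle : q ≤ k * q := Nat.le_mul_of_pos_left q (by omega)
        have hsub : m - q = (k - 1) * q + r := by omega
        have hgl : k - 1 ≤ (k - 1) * q := Nat.le_mul_of_pos_right (k - 1) (by omega)
        have hge : k - 1 ≤ m - q := by omega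
        by_cases hrtop : r = k - 1
        · have hx : (k - 1) * (q + 1) = (k - 1) * q + (k - 1) := by ring
          have hdiv : (m - q) / (k - 1) = q + 1 ∧ (m - q) % (k - 1) = 0 := by
            rw [Nat.div_mod_unique (by omega)]
            omega
          unfold pvSizesB
          rw [if_pos hkm, if_pos hge, hdiv.1, hdiv.2, ← hq, ← hr]
          have hkr : k - r = 1 := by omega
          rw [hkr, hrtop]
          simp [List.replicate_succ]
        · have hdiv : (m - q) / (k - 1) = q ∧ (m - q) % (k - 1) = r := by
            rw [Nat.div_mod_unique (by omega)]
            omega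
          unfold pvSizesB
          rw [if_pos hkm, if_pos hge, hdiv.1, hdiv.2, ← hq, ← hr]
          have hkr : k - r = ((k - 1) - r) + 1 := by omega
          rw [hkr, List.replicate_succ]
          simp
      · -- m < k : size 1, m ≥ 2 here
        have hdz : m / k = 0 := Nat.div_eq_of_lt (by omega)
        have hsd : max 1 (m / k) = 1 := by omega
        rw [hsd]
        have hm2 : 2 ≤ m := by
          rw [hsd] at hble; omega
        have hkm' : ¬ k - 1 ≤ m - 1 := by omega
        unfold pvSizesB
        rw [if_neg hkm, if_neg hkm']
        have h2 : List.replicate m (1 : Nat) = 1 :: List.replicate (m - 1) 1 := by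
          cases m with
          | zero => omega
          | succ m' => simp [List.replicate_succ]
        have h3 : k - m = (k - 1) - (m - 1) := by omega
        rw [h2, h3]
        simp

-- A's loop equals rendering the greedy sizes
theorem pvALoop_eq (parts : List String) (n K : Nat) :
    ∀ m, 1 ≤ m → ∀ (k i : Nat) (lines : List String), 1 ≤ k → k ≤ K → i + m = n →
      pvALoop parts (n : Int) (K : Int) (PySem.List.pyRange ((K : Int) - k) (K : Int) 1) lines (i : Int)
        = lines ++ pvRender parts i (pvSizesA m k) := by
  intro m
  induction m using Nat.strong_induction_on with
  | _ m ih =>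
    intro hm k i lines hk hkK hin
    have hlt : (K : Int) - k < (K : Int) := by omega
    rw [PySem.List.pyRange_one_cons hlt]
    have hkpos : (K : Int) - ((K : Int) - k) > 0 := by omega
    unfold pvALoop
    simp only [hkpos, if_pos]
    have hrem : (n : Int) - (i : Int) = (m : Int) := by omega
    have hsz : max 1 (PySem.Int.floordiv ((n : Int) - i) ((K : Int) - ((K : Int) - k)))
        = ((max 1 (m / k) : Nat) : Int) := by
      rw [hrem]
      have h1 : (K : Int) - ((K : Int) - (k : Int)) = ((k : Nat) : Int) := by omega
      rw [h1, PySem.Int.floordiv_natCast]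
      push_cast
      omega
    rw [hsz]
    have hslice : PySem.List.slice parts (some (i : Int)) (some ((i : Int) + ((max 1 (m / k) : Nat) : Int)))
        = (parts.drop i).take (max 1 (m / k)) := by
      have := PySem.List.slice_natCast_add parts i (max 1 (m / k))
      exact_mod_cast this
    rw [hslice]
    by_cases hbrk : m ≤ max 1 (m / k)
    · have hge : (i : Int) + ((max 1 (m / k) : Nat) : Int) ≥ (n : Int) := by push_cast; omega
      rw [if_pos hge, pvSizesA, if_pos hbrk]
      simp [pvRender]
    · have hge : ¬ ((i : Int) + ((max 1 (m / k) : Nat) : Int) ≥ (n : Int)) := by push_cast; omega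
      rw [if_neg hge]
      have hk2 : 2 ≤ k := by
        by_contra hne
        have hk1 : k = 1 := by omega
        subst hk1
        rw [Nat.div_one] at hbrk
        omega
      have hrangeEq : (K : Int) - (k : Int) + 1 = (K : Int) - ((k - 1 : Nat) : Int) := by omega
      have hiEq : (i : Int) + ((max 1 (m / k) : Nat) : Int) = (((i + max 1 (m / k)) : Nat) : Int) := by omega
      rw [hrangeEq, hiEq,
        ih (m - max 1 (m / k)) (by omega) (by omega) (k - 1) (i + max 1 (m / k)) _ (by omega) (by omega) (by omega)]
      have hA : pvSizesA m k = max 1 (m / k) :: pvSizesA (m - max 1 (m / k)) (k - 1) := by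
        conv_lhs => rw [pvSizesA]
        rw [if_neg hbrk]
      rw [hA]
      simp [pvRender, List.append_assoc]

-- the pad loop appends exactly the missing empty strings
theorem pvPad_eq (K : Nat) : ∀ (d : Nat) (L : List String), L.length + d = K →
    pvPad (K : Int) L = L ++ List.replicate d "" := by
  intro d
  induction d with
  | zero =>
    intro L hL
    rw [pvPad]
    have : ¬ ((L.length : Int) < (K : Int)) := by omega
    rw [if_neg this]
    simp
  | succ d ih =>
    intro L hL
    rw [pvPad]
    have : (L.length : Int) < (K : Int) := by omega
    rw [if_pos this, ih (L ++ [""]) (by simp; omega)]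
    simp [List.replicate_succ, List.append_assoc]

-- B's fold over cast sizes is the same renderer
theorem pvFold_eq (parts : List String) :
    ∀ (ss : List Nat) (i : Nat) (acc : List String),
      ((ss.map (fun s : Nat => (s : Int))).foldl
        (fun (acc : List String × Int) s =>
          (acc.1 ++ [PySem.Str.join ", " (PySem.List.slice parts (some acc.2) (some (acc.2 + s)))],
           acc.2 + s))
        (acc, (i : Int))).1 = acc ++ pvRender parts i ss := by
  intro ss
  induction ss with
  | nil => intro i acc; simp [pvRender]
  | cons s ss ih =>
    intro i acc
    simp only [List.map_cons, List.foldl_cons]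
    have hslice : PySem.List.slice parts (some (i : Int)) (some ((i : Int) + (s : Int)))
        = (parts.drop i).take s := PySem.List.slice_natCast_add parts i s
    have hcast : (i : Int) + (s : Int) = (((i + s) : Nat) : Int) := by omega
    rw [hslice, hcast, ih (i + s)]
    simp [pvRender, List.append_assoc]

-- B's Int size list is the cast of pvSizesB
theorem pvSizesB_cast (n K : Nat) (hn : 1 ≤ n) (hK : 1 ≤ K) :
    (if (n : Int) ≥ (K : Int) then
        PySem.List.pyRepeat [PySem.Int.floordiv (n : Int) (K : Int)]
          ((K : Int) - PySem.Int.mod (n : Int) (K : Int)) ++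
        PySem.List.pyRepeat [PySem.Int.floordiv (n : Int) (K : Int) + 1]
          (PySem.Int.mod (n : Int) (K : Int))
      else
        PySem.List.pyRepeat [(1 : Int)] (n : Int) ++ PySem.List.pyRepeat [(0 : Int)] ((K : Int) - (n : Int)))
      = (pvSizesB n K).map (fun s : Nat => (s : Int)) := by
  by_cases h : K ≤ n
  · have hge : (n : Int) ≥ (K : Int) := by exact_mod_cast h
    have hmod : n % K < K := Nat.mod_lt _ (by omega)
    rw [if_pos hge]
    unfold pvSizesB
    rw [if_pos h]
    rw [PySem.Int.floordiv_natCast, PySem.Int.mod_natCast]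
    rw [PySem.List.pyRepeat_singleton, PySem.List.pyRepeat_singleton]
    have h1 : ((K : Int) - ((n % K : Nat) : Int)).toNat = K - n % K := by omega
    have h2 : (((n % K : Nat) : Int)).toNat = n % K := by omega
    rw [h1, h2]
    rw [List.map_append, List.map_replicate, List.map_replicate]
    push_cast
    rfl
  · have hge : ¬ ((n : Int) ≥ (K : Int)) := by
      simp only [ge_iff_le, not_le]; exact_mod_cast Nat.lt_of_not_le h
    rw [if_neg hge]
    unfold pvSizesB
    rw [if_neg h]
    rw [PySem.List.pyRepeat_singleton, PySem.List.pyRepeat_singleton]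
    have h1 : ((n : Nat) : Int).toNat = n := by omega
    have h2 : ((K : Int) - (n : Int)).toNat = K - n := by omega
    rw [h1, h2]
    rw [List.map_append, List.map_replicate, List.map_replicate]
    push_cast
    rfl

-- ===== VERDICT (by name: the statement is the Claim_ definition above) =====
theorem wrap_address_top_down_balanced_spec : Claim_equal_wrap_address_top_down_balanced := by
  intro text rows _hdom
  unfold Spec_wrap_address_top_down_balanced
  unfold wrap_address_top_down_balanced wrap_address_top_down_balanced_alt
  set parts := (((PySem.Str.split? text ",").getD []).filter
      (fun part => PySem.Str.strip part ≠ "")).map PySem.Str.strip with hparts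
  by_cases h0 : (parts.length : Int) = 0
  · rw [if_pos h0, if_pos h0]
  · simp only [if_neg h0]
    by_cases hneg : rows ≤ 0
    · rw [if_pos hneg]
      have hrange : PySem.List.pyRange 0 rows 1 = [] := PySem.List.pyRange_one_eq_nil (by omega)
      rw [hrange]
      show PySem.List.slice (pvPad rows (pvALoop parts _ rows [] [] 0)) none (some rows) = []
      have hal : pvALoop parts (parts.length : Int) rows [] [] 0 = [] := rfl
      rw [hal, pvPad]
      have : ¬ (((([] : List String).length : Int)) < rows) := by simp; omega
      rw [if_neg this]
      simp [PySem.List.slice, PySem.List.clampIdx]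
    · rw [if_neg hneg]
      set n := parts.length with hn
      have hn1 : 1 ≤ n := by omega
      obtain ⟨K, hKrows⟩ : ∃ K : Nat, rows = (K : Int) :=
        ⟨rows.toNat, by omega⟩
      have hK1 : 1 ≤ K := by omega
      subst hKrows
      -- A side
      have hA := pvALoop_eq parts n K n hn1 K 0 [] hK1 (le_refl K) (by omega)
      have hr0 : (K : Int) - (K : Nat) = 0 := by omega
      rw [hr0] at hA
      have hACast : ((0 : Nat) : Int) = (0 : Int) := rfl
      rw [hACast] at hA
      rw [hA]
      simp only [List.nil_append]
      -- lengths
      have hlenB : (pvSizesB n K).length = K := pvSizesB_length n K hn1 hK1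
      have hkey := pvSizes_key n K hn1 hK1
      have hlenA : (pvSizesA n K).length ≤ K := by
        have := congrArg List.length hkey
        simp [hlenB] at this
        omega
      -- pad
      have hpad := pvPad_eq K (K - (pvSizesA n K).length)
        (pvRender parts 0 (pvSizesA n K))
        (by rw [pvRender_length]; omega)
      rw [hpad]
      -- truncate: total length is K
      have hlenFull : (pvRender parts 0 (pvSizesA n K) ++
          List.replicate (K - (pvSizesA n K).length) "").length = K := by
        simp [pvRender_length]; omega
      have htr : PySem.List.slice (pvRender parts 0 (pvSizesA n K) ++
          List.replicate (K - (pvSizesA n K).length) "") none (some (K : Int))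
          = pvRender parts 0 (pvSizesA n K) ++ List.replicate (K - (pvSizesA n K).length) "" := by
        rw [PySem.List.slice_to_natCast]
        rw [List.take_of_length_le (by omega)]
      rw [htr]
      -- A's padded render is the render of the padded sizes
      have hApadded : pvRender parts 0 (pvSizesA n K) ++
          List.replicate (K - (pvSizesA n K).length) ""
          = pvRender parts 0 (pvSizesB n K) := by
        rw [← hkey, pvRender_append, pvRender_replicate_zero]
      rw [hApadded]
      -- B side
      rw [pvSizesB_cast n K hn1 hK1]
      have hB := pvFold_eq parts (pvSizesB n K) 0 []
      have hB0 : ((0 : Nat) : Int) = (0 : Int) := rfl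
      rw [hB0] at hB
      rw [hB]
      simp
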